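-- pv_equiv track=rewrite | github.com/avioforse/equation | 250930-equation/procedural -op-equation/equationFinal.py | tokenize
-- ===== SOURCE A (Python) =====
-- def tokenize(string: str) -> list[str]:
--     arr = []
--     for i, ch in enumerate(string):
--         if (ch).isdigit():
--             arr.append(ch)
--             if i!=0 and (arr[-2]).isdigit():
--                 arr[-2] += arr[-1]
--                 arr.pop(-1)
--         else:
--             arr.append(string[i])
--     return arr
-- ===== SOURCE B (Python) =====
-- def tokenize(string: str) -> list[str]:
--     arr = []
--     i = 0
--     n = len(string)
--     while i < n:
--         if string[i].isdigit():
--             j = i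
--             while j < n and string[j].isdigit():
--                 j += 1
--             arr.append(string[i:j])
--             i = j
--         else:
--             arr.append(string[i])
--             i += 1
--     return arr
-- ===== Notes on version B (the rewrite author's own statement) =====
-- stated objective: simpler
-- what changed: B scans with an explicit index, slicing each maximal digit run out in one step, instead of appending every digit and back-patching/merging the last two list entries as A does.
import Mathlib
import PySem

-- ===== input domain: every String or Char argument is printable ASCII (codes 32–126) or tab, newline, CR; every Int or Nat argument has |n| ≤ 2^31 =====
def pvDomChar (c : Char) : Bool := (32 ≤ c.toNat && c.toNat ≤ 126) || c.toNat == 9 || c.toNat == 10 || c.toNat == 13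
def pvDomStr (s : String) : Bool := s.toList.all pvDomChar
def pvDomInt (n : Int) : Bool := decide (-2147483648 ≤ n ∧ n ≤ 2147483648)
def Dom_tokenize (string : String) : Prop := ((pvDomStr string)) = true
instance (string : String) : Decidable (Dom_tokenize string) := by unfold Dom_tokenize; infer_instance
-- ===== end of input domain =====

-- B tokenizes by scanning each maximal digit run and emitting it as one token,
-- instead of A's append-every-digit-then-merge-the-last-two back-patching; objective: simpler.


-- ===== PORT A =====
-- tokens are kept as List Char (Python strings) and wrapped with String.ofList at the end.
-- one loop iteration of A: append ch; if i != 0 and arr[-2].isdigit(): arr[-2] += arr[-1]; arr.pop(-1)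
def tokAStep (arr : List (List Char)) (p : Int × Char) : List (List Char) :=
  if PySem.Chars.isdigit p.2 then
    let arr1 := arr ++ [[p.2]]
    if (p.1 != 0) && PySem.Chars.strIsdigit ((PySem.List.pyGet? arr1 (-2)).getD []) then
      arr1.dropLast.dropLast ++
        [((PySem.List.pyGet? arr1 (-2)).getD []) ++ ((PySem.List.pyGet? arr1 (-1)).getD [])]
    else arr1
  else arr ++ [[p.2]]  -- string[i] is ch (enumerate pairs i with string[i])

def tokenize (string : String) : List String :=
  (((PySem.List.enumerate string.toList 0)).foldl tokAStep []).map String.ofList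

-- ===== PORT B =====
-- Source B's index scan: on a digit at i, the inner `while j` advance and the slice string[i:j]
-- take the maximal digit run (takeWhile), and i = j resumes right after it (dropWhile);
-- on a non-digit, emit that one character and advance by one.
def tokBGo : List Char → List (List Char)
  | [] => []
  | c :: cs =>
    if PySem.Chars.isdigit c then
      (c :: cs.takeWhile PySem.Chars.isdigit) :: tokBGo (cs.dropWhile PySem.Chars.isdigit)
    else
      [c] :: tokBGo cs
termination_by cs => cs.length
decreasing_by
  · exact Nat.lt_succ_of_le (List.length_dropWhile_le _ _)
  · exact Nat.lt_succ_self _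

def tokenize_alt (string : String) : List String :=
  (tokBGo string.toList).map String.ofList

-- ===== PRECONDITION & SPEC =====
def Spec_tokenize (string : String) (out : List String) : Prop := out = tokenize_alt string
instance (string : String) (out : List String) : Decidable (Spec_tokenize string out) := by unfold Spec_tokenize; infer_instance

-- ===== CLAIM (what is proved, stated in full; the proofs are below) =====
def Claim_equal_tokenize : Prop := ∀ (string : String), Dom_tokenize string → Spec_tokenize string (tokenize string)

-- ===== LEMMAS AND PROOFS =====

-- what A's accumulator (split as ys ++ [y]) becomes once the remaining tokens ts are produced:
-- a leading digit token of ts merges into a digit last element y, everything else is appended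
def tokGlue (ys : List (List Char)) (y : List Char) : List (List Char) → List (List Char)
  | [] => ys ++ [y]
  | t :: ts =>
    if PySem.Chars.strIsdigit y && PySem.Chars.strIsdigit t then ys ++ (y ++ t) :: ts
    else ys ++ y :: t :: ts

lemma pyGet?_neg_two_pair (l : List (List Char)) (a b : List Char) :
    PySem.List.pyGet? (l ++ [a, b]) (-2) = some a := by
  simp [PySem.List.pyGet?, PySem.List.pyIdx?]

lemma pyGet?_neg_one_pair (l : List (List Char)) (a b : List Char) :
    PySem.List.pyGet? (l ++ [a, b]) (-1) = some b := by
  simp [PySem.List.pyGet?, PySem.List.pyIdx?]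

lemma strIsdigit_singleton (c : Char) : PySem.Chars.strIsdigit [c] = PySem.Chars.isdigit c := by
  simp [PySem.Chars.strIsdigit]

lemma strIsdigit_append_singleton (y : List Char) (c : Char)
    (hy : PySem.Chars.strIsdigit y = true) (hc : PySem.Chars.isdigit c = true) :
    PySem.Chars.strIsdigit (y ++ [c]) = true := by
  simp [PySem.Chars.strIsdigit, hc] at *; tauto

lemma strIsdigit_cons_takeWhile (c : Char) (cs : List Char)
    (h : PySem.Chars.isdigit c = true) :
    PySem.Chars.strIsdigit (c :: cs.takeWhile PySem.Chars.isdigit) = true := by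
  simp [PySem.Chars.strIsdigit, h]

lemma strIsdigit_cons_cons_takeWhile (c c2 : Char) (cs2 : List Char)
    (hc : PySem.Chars.isdigit c = true) (hc2 : PySem.Chars.isdigit c2 = true) :
    PySem.Chars.strIsdigit (c :: c2 :: cs2.takeWhile PySem.Chars.isdigit) = true := by
  simp [PySem.Chars.strIsdigit, hc, hc2]

lemma tokBGo_cons_nondigit (c2 : Char) (cs2 : List Char)
    (hc2 : ¬ PySem.Chars.isdigit c2 = true) :
    tokBGo (c2 :: cs2) = [c2] :: tokBGo cs2 := by
  rw [tokBGo]; simp [hc2]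

-- A's loop invariant: from a nonempty accumulator ys ++ [y] and index k ≥ 1,
-- A produces exactly B's tokens of the rest, with a leading digit run merged into a digit y
lemma tokA_main (cs : List Char) (k : Int) (ys : List (List Char)) (y : List Char)
    (hk : 0 < k) :
    (PySem.List.enumerate cs k).foldl tokAStep (ys ++ [y]) = tokGlue ys y (tokBGo cs) := by
  induction cs generalizing k ys y with
  | nil => simp [PySem.List.enumerate_nil, tokBGo, tokGlue]
  | cons c cs ih =>
    have hk' : (k != 0) = true := by simp only [bne_iff_ne, ne_eq]; omega
    rw [PySem.List.enumerate_cons, List.foldl_cons]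
    by_cases hc : PySem.Chars.isdigit c
    · by_cases hy : PySem.Chars.strIsdigit y
      · have hstep : tokAStep (ys ++ [y]) (k, c) = ys ++ [y ++ [c]] := by
          simp [tokAStep, hc, hk', pyGet?_neg_two_pair, pyGet?_neg_one_pair, hy]
        rw [hstep, ih (k+1) ys (y ++ [c]) (by omega)]
        rw [tokBGo]
        cases cs with
        | nil => simp [tokBGo, tokGlue, hc, hy, strIsdigit_singleton]
        | cons c2 cs2 =>
          by_cases hc2 : PySem.Chars.isdigit c2
          · rw [tokBGo]
            simp [tokGlue, hc, hc2, hy, strIsdigit_cons_cons_takeWhile c c2 cs2 hc hc2,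
              strIsdigit_cons_takeWhile c2 cs2 hc2,
              strIsdigit_append_singleton y c hy hc]
          · simp [tokBGo_cons_nondigit c2 cs2 hc2, tokGlue, hc, hc2, hy,
              strIsdigit_append_singleton y c hy hc, strIsdigit_singleton]
      · have hstep : tokAStep (ys ++ [y]) (k, c) = (ys ++ [y]) ++ [[c]] := by
          simp [tokAStep, hc, hk', pyGet?_neg_two_pair, hy]
        rw [hstep, ih (k+1) (ys ++ [y]) [c] (by omega)]
        rw [tokBGo]
        cases cs with
        | nil => simp [tokBGo, tokGlue, hc, hy, strIsdigit_singleton]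
        | cons c2 cs2 =>
          by_cases hc2 : PySem.Chars.isdigit c2
          · rw [tokBGo]
            simp [tokGlue, hc, hc2, hy, strIsdigit_cons_cons_takeWhile c c2 cs2 hc hc2,
              strIsdigit_cons_takeWhile c2 cs2 hc2,
              strIsdigit_singleton]
          · simp [tokBGo_cons_nondigit c2 cs2 hc2, tokGlue, hc, hc2, hy,
              strIsdigit_singleton]
    · have hstep : tokAStep (ys ++ [y]) (k, c) = (ys ++ [y]) ++ [[c]] := by
        simp [tokAStep, hc]
      rw [hstep, ih (k+1) (ys ++ [y]) [c] (by omega), tokBGo_cons_nondigit c cs hc]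
      cases h : tokBGo cs with
      | nil => simp [tokGlue, strIsdigit_singleton, hc]
      | cons t ts => simp [tokGlue, strIsdigit_singleton, hc]

-- A's first iteration (i = 0) only appends; afterwards tokA_main applies
lemma tokAStep_zero (c : Char) : tokAStep [] ((0 : Int), c) = [[c]] := by
  simp [tokAStep]

lemma tokGlue_head (c : Char) (cs : List Char) :
    tokGlue [] [c] (tokBGo cs) = tokBGo (c :: cs) := by
  by_cases hc : PySem.Chars.isdigit c
  · rw [tokBGo.eq_def (c :: cs)]
    cases cs with
    | nil => simp [tokBGo, tokGlue, hc]
    | cons c2 cs2 =>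
      by_cases hc2 : PySem.Chars.isdigit c2
      · rw [tokBGo]
        simp [tokGlue, hc, hc2, strIsdigit_singleton, strIsdigit_cons_takeWhile c2 cs2 hc2]
      · simp [tokBGo_cons_nondigit c2 cs2 hc2, tokGlue, hc, hc2, strIsdigit_singleton]
  · rw [tokBGo_cons_nondigit c cs hc]
    cases h : tokBGo cs with
    | nil => simp [tokGlue]
    | cons t ts => simp [tokGlue, strIsdigit_singleton, hc]

theorem tokenize_eq_alt (string : String) : tokenize string = tokenize_alt string := by
  unfold tokenize tokenize_alt
  cases string.toList with
  | nil => simp [PySem.List.enumerate_nil, tokBGo]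
  | cons c cs =>
    rw [PySem.List.enumerate_cons, List.foldl_cons, tokAStep_zero,
      show ([[c]] : List (List Char)) = [] ++ [[c]] from rfl, show (0:Int)+1 = 1 from rfl,
      tokA_main cs 1 [] [c] (by norm_num), tokGlue_head]

-- ===== VERDICT (by name: the statement is the Claim_ definition above) =====
theorem tokenize_spec : Claim_equal_tokenize := by
  intro s _
  exact tokenize_eq_alt s
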